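-- pv_equiv track=rewrite | github.com/wy929/wildfire-diffusion | src/utils/data.py | is_continuously_increasing
-- ===== SOURCE A (Python) =====
-- def is_continuously_increasing(values, tolerance=10):
--     """
--     Determine whether the provided values are continuously increasing (within tolerance).
--
--     Args:
--         values (list): List of numerical values (e.g., burned area per generation).
--         tolerance (int, optional): Maximum allowed consecutive non-increasing values. Defaults to 10.
--
--     Returns:
--         bool: True if the sequence is continuously increasing within the tolerance, otherwise False.
--     """
--     non_growth_count = 0
--     # Check if the values are continuously increasing
--     for i in range(1, len(values)):
--         if values[i] > values[i-1]:
--             non_growth_count = 0  # Reset the count if there's growth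
--         else:
--             non_growth_count += 1  # Increment the count if there's no growth
--
--         if non_growth_count > tolerance:
--             return False
--
--     return True
-- ===== SOURCE B (Python) =====
-- def is_continuously_increasing(values, tolerance=10):
--     """True iff no window of tolerance+1 consecutive adjacent pairs is entirely
--     non-growing: an existence check over windows instead of a running counter."""
--     n = len(values)
--     if n < 2:
--         return True
--     w = tolerance + 1
--     return not any(
--         all(values[j + 1] <= values[j] for j in range(i, i + w))
--         for i in range(n - w)
--     )
-- ===== Notes on version B (the rewrite author's own statement) =====
-- stated objective: alternative
-- what changed: A makes one pass with a running non-growth counter and an early return; B instead decides the question as a window-existence check: it returns False exactly when some window of tolerance+1 consecutive adjacent pairs is entirely non-growing, scanning each candidate window directly with no counter or run-length state.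
import Mathlib
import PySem

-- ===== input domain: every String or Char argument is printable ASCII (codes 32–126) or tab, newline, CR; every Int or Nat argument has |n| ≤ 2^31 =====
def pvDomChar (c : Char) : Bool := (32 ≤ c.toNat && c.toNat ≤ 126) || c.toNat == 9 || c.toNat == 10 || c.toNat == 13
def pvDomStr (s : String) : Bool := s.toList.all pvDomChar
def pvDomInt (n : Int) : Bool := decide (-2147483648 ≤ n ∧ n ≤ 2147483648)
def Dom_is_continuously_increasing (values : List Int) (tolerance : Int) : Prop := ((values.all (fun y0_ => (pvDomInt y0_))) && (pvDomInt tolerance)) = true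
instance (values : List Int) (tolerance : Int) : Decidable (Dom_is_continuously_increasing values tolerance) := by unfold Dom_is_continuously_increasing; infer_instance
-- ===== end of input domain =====

-- B decides the question as a window-existence check (False iff some window of
-- tolerance+1 consecutive adjacent pairs is entirely non-growing), scanning each
-- candidate window directly instead of A's running counter with early return
-- (alternative decomposition, not faster).


-- ===== PORT A =====
-- the 'for i in range(1, len(values))' loop; the index list is the remaining range
def pvALoop (values : List Int) (tolerance : Int) : List Int → Int → Bool
  | [], _ => true
  | i :: rest, cnt =>
    match PySem.List.pyGet? values i, PySem.List.pyGet? values (i - 1) with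
    | some vi, some vp =>
      let cnt' := if vi > vp then 0 else cnt + 1
      if cnt' > tolerance then false else pvALoop values tolerance rest cnt'
    | _, _ => true  -- unreachable: every i drawn from range(1, len(values)) is in bounds

def is_continuously_increasing (values : List Int) (tolerance : Int) : Bool :=
  pvALoop values tolerance (PySem.List.pyRange 1 values.length 1) 0

-- ===== PORT B =====
-- one term of the inner generator: values[j + 1] <= values[j]
def pvPairBad (values : List Int) (j : Int) : Bool :=
  match PySem.List.pyGet? values (j + 1), PySem.List.pyGet? values j with
  | some b, some a => decide (b ≤ a)
  | _, _ => true  -- unreachable: every j drawn from range(i, i + w) with i in range(n - w) is in bounds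

-- 'any(... for i in range(...))' over a lazy generator: a short-circuiting loop
-- over the range bounds (Python's any stops at the first true window)
def pvAnyWin (values : List Int) (w : Int) (i stop : Int) : Bool :=
  if h : i < stop then
    if (PySem.List.pyRange i (i + w) 1).all (fun j => pvPairBad values j) then true
    else pvAnyWin values w (i + 1) stop
  else false
termination_by (stop - i).toNat
decreasing_by omega

def is_continuously_increasing_alt (values : List Int) (tolerance : Int) : Bool :=
  let n : Int := values.length
  if n < 2 then true
  else
    let w := tolerance + 1
    ! (pvAnyWin values w 0 (n - w))

-- ===== PRECONDITION & SPEC =====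
def Spec_is_continuously_increasing (values : List Int) (tolerance : Int) (out : Bool) : Prop := out = is_continuously_increasing_alt values tolerance
instance (values : List Int) (tolerance : Int) (out : Bool) : Decidable (Spec_is_continuously_increasing values tolerance out) := by unfold Spec_is_continuously_increasing; infer_instance

-- ===== CLAIM (what is proved, stated in full; the proofs are below) =====
def Claim_equal_is_continuously_increasing : Prop := ∀ (values : List Int) (tolerance : Int), Dom_is_continuously_increasing values tolerance → Spec_is_continuously_increasing values tolerance (is_continuously_increasing values tolerance)

-- ===== LEMMAS AND PROOFS =====

-- the list of per-step no-growth flags (proof-only abstraction of the adjacent pairs)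
def pvFlags (values : List Int) : List Bool :=
  (values.zip (values.drop 1)).map (fun p => decide (p.2 ≤ p.1))

-- A's loop, rephrased as structural recursion directly on the flag list
def pvF (t : Int) : List Bool → Int → Bool
  | [], _ => true
  | f :: fs, c =>
    let c' := if f then c + 1 else 0
    if c' > t then false else pvF t fs c'

theorem pvFlags_cons_cons (a b : Int) (l : List Int) :
    pvFlags (a :: b :: l) = decide (b ≤ a) :: pvFlags (b :: l) := by
  simp [pvFlags]

theorem pvFlags_short (v : List Int) (h : v.length ≤ 1) : pvFlags v = [] := by
  match v with
  | [] => simp [pvFlags]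
  | [a] => simp [pvFlags]
  | a :: b :: l => simp at h

theorem pvFlags_length (v : List Int) : (pvFlags v).length = v.length - 1 := by
  simp [pvFlags]

theorem pvFlags_getD (v : List Int) (j : Nat) (h : j + 1 < v.length) :
    (pvFlags v).getD j false = decide (v[j+1]'h ≤ v[j]'(by omega)) := by
  have hj : j < (pvFlags v).length := by rw [pvFlags_length]; omega
  rw [List.getD_eq_getElem _ _ hj]
  simp [pvFlags]

-- bridge: A's index loop over range(k, n) equals pvF on the flags of drop (k-1)
theorem pvALoop_eq_pvF (values : List Int) (t : Int) :
    ∀ (k : Nat) (c : Int), 1 ≤ k →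
      pvALoop values t (PySem.List.pyRange (k : Int) (values.length : Int) 1) c
        = pvF t (pvFlags (values.drop (k - 1))) c := by
  intro k c hk
  by_cases h : k < values.length
  · have hrange : PySem.List.pyRange (k : Int) (values.length : Int) 1
        = (k : Int) :: PySem.List.pyRange ((k : Int) + 1) (values.length : Int) 1 :=
      PySem.List.pyRange_one_cons (by exact_mod_cast h)
    have hk1 : k - 1 < values.length := by omega
    have hdrop : values.drop (k - 1) = values[k-1] :: values.drop k := by
      have := List.drop_eq_getElem_cons hk1
      have h1 : k - 1 + 1 = k := by omega
      rwa [h1] at this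
    have hdrop2 : values.drop k = values[k] :: values.drop (k + 1) :=
      List.drop_eq_getElem_cons h
    have hget1 : PySem.List.pyGet? values (k : Int) = some values[k] :=
      PySem.List.pyGet?_ofNat values k h
    have hget2 : PySem.List.pyGet? values ((k : Int) - 1) = some values[k-1] := by
      have : ((k : Int) - 1) = ((k - 1 : Nat) : Int) := by omega
      rw [this]
      exact PySem.List.pyGet?_ofNat values (k-1) hk1
    rw [hrange]
    have hrec := pvALoop_eq_pvF values t (k + 1) (if values[k] > values[k-1] then 0 else c + 1) (by omega)
    rw [pvALoop, hget1, hget2]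
    rw [hdrop, hdrop2, pvFlags_cons_cons, pvF]
    simp only [Nat.add_sub_cancel, Nat.cast_add, Nat.cast_one] at hrec
    rw [hdrop2] at hrec
    by_cases hgt : values[k] > values[k-1]
    · have hle : ¬ (values[k] ≤ values[k-1]) := by omega
      simp only [if_pos hgt, decide_eq_true_eq, if_neg hle]
      simp only [if_pos hgt] at hrec
      split_ifs with h0
      · rfl
      · exact hrec
    · have hle : values[k] ≤ values[k-1] := by omega
      simp only [if_neg hgt, decide_eq_true_eq, if_pos hle]
      simp only [if_neg hgt] at hrec
      split_ifs with h0
      · rfl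
      · exact hrec
  · have : PySem.List.pyRange (k : Int) (values.length : Int) 1 = [] :=
      PySem.List.pyRange_one_eq_nil (by exact_mod_cast Nat.not_lt.mp h)
    rw [this]
    have hlen : (values.drop (k - 1)).length ≤ 1 := by
      simp only [List.length_drop]; omega
    rw [pvFlags_short _ hlen]
    rfl
termination_by k => values.length - k

-- 'there is a window of w consecutive true flags', at any position / at a positive position
def pvWin (w : Nat) (fs : List Bool) : Prop :=
  ∃ i : Nat, i + w ≤ fs.length ∧ ∀ k, k < w → fs.getD (i + k) false = true

def pvWinPos (w : Nat) (fs : List Bool) : Prop :=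
  ∃ i : Nat, 0 < i ∧ i + w ≤ fs.length ∧ ∀ k, k < w → fs.getD (i + k) false = true

theorem pvWinPos_cons (w : Nat) (f : Bool) (rest : List Bool) :
    pvWinPos w (f :: rest) ↔ pvWin w rest := by
  constructor
  · rintro ⟨i, hi, hlen, hall⟩
    refine ⟨i - 1, by simp at hlen ⊢; omega, fun k hk => ?_⟩
    have := hall k hk
    have hidx : i + k = (i - 1 + k) + 1 := by omega
    rwa [hidx, List.getD_cons_succ] at this
  · rintro ⟨i, hlen, hall⟩
    refine ⟨i + 1, by omega, by simp; omega, fun k hk => ?_⟩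
    have hidx : i + 1 + k = (i + k) + 1 := by omega
    rw [hidx, List.getD_cons_succ]
    exact hall k hk

theorem pvWin_imp (tn c' : Nat) (rest : List Bool) (h : pvWin (tn + 1) rest) :
    (∃ j : Nat, j < rest.length ∧ (∀ k, k ≤ j → rest.getD k false = true) ∧ tn < c' + j + 1)
      ∨ pvWinPos (tn + 1) rest := by
  obtain ⟨i, hlen, hall⟩ := h
  by_cases hi : i = 0
  · subst hi
    exact Or.inl ⟨tn, by omega, fun k hk => by simpa using hall k (by omega), by omega⟩
  · exact Or.inr ⟨i, by omega, hlen, hall⟩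

theorem pvPrefix_imp_pvWin (tn : Nat) (rest : List Bool) (j : Nat) (hj : j < rest.length)
    (hall : ∀ k, k ≤ j → rest.getD k false = true) (hbig : tn < j + 1) :
    pvWin (tn + 1) rest :=
  ⟨0, by omega, fun k hk => by simpa using hall k (by omega)⟩

-- core characterization of A's scan: it fails iff the run through the entry
-- counter overflows or some window of tn+1 true flags exists at a later position
theorem pvF_false_iff (tn : Nat) (fs : List Bool) :
    ∀ c : Nat, c ≤ tn →
      (pvF (tn : Int) fs (c : Int) = false ↔
        (∃ j : Nat, j < fs.length ∧ (∀ k, k ≤ j → fs.getD k false = true) ∧ tn < c + j + 1)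
          ∨ pvWinPos (tn + 1) fs) := by
  induction fs with
  | nil =>
    intro c hc
    simp [pvF, pvWinPos]
  | cons f rest ih =>
    intro c hc
    cases f with
    | true =>
      by_cases hover : c = tn
      · subst hover
        constructor
        · intro _
          exact Or.inl ⟨0, by simp, by intro k hk; interval_cases k; simp, by omega⟩
        · intro _
          simp only [pvF]
          have h1 : ((c : Int) + 1 > (c : Int)) := by omega
          simp [h1]
      · have hc1 : c + 1 ≤ tn := by omega
        have hstep : pvF (tn : Int) (true :: rest) (c : Int) = pvF (tn : Int) rest ((c : Int) + 1) := by
          simp only [pvF]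
          have h1 : ¬ ((c : Int) + 1 > (tn : Int)) := by omega
          simp [h1]
        have hcast : ((c : Int) + 1) = (((c + 1 : Nat)) : Int) := by omega
        rw [hstep, hcast, ih (c + 1) hc1]
        constructor
        · rintro (⟨j, hj, hall, hbig⟩ | hwin)
          · exact Or.inl ⟨j + 1, by simp; omega,
              fun k hk => by
                cases k with
                | zero => simp
                | succ k' => rw [List.getD_cons_succ]; exact hall k' (by omega),
              by omega⟩
          · right
            rw [pvWinPos_cons]
            obtain ⟨i, hi, hlen, hall⟩ := hwin
            exact ⟨i, hlen, hall⟩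
        · rintro (⟨j, hj, hall, hbig⟩ | hwin)
          · cases j with
            | zero => omega
            | succ j' =>
              exact Or.inl ⟨j', by simp at hj; omega,
                fun k hk => by
                  have := hall (k + 1) (by omega)
                  rwa [List.getD_cons_succ] at this,
                by omega⟩
          · rw [pvWinPos_cons] at hwin
            exact pvWin_imp tn (c + 1) rest hwin
    | false =>
      have hstep : pvF (tn : Int) (false :: rest) (c : Int) = pvF (tn : Int) rest 0 := by
        simp only [pvF]
        have h1 : ¬ ((0 : Int) > (tn : Int)) := by omega
        simp [h1]
      have h0 : ((0 : Int)) = (((0 : Nat)) : Int) := by norm_num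
      rw [hstep, h0, ih 0 (by omega)]
      constructor
      · rintro (⟨j, hj, hall, hbig⟩ | hwin)
        · right
          rw [pvWinPos_cons]
          exact pvPrefix_imp_pvWin tn rest j hj hall (by omega)
        · right
          rw [pvWinPos_cons]
          obtain ⟨i, hi, hlen, hall⟩ := hwin
          exact ⟨i, hlen, hall⟩
      · rintro (⟨j, hj, hall, hbig⟩ | hwin)
        · have := hall 0 (by omega)
          simp at this
        · rw [pvWinPos_cons] at hwin
          exact pvWin_imp tn 0 rest hwin

-- at entry counter 0 the characterization collapses to plain window existence
theorem pvF_zero_false_iff (tn : Nat) (fs : List Bool) :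
    pvF (tn : Int) fs 0 = false ↔ pvWin (tn + 1) fs := by
  have h0 : ((0 : Int)) = (((0 : Nat)) : Int) := by norm_num
  rw [h0, pvF_false_iff tn fs 0 (by omega)]
  constructor
  · rintro (⟨j, hj, hall, hbig⟩ | hwin)
    · exact pvPrefix_imp_pvWin tn fs j hj hall (by omega)
    · obtain ⟨i, hi, hlen, hall⟩ := hwin
      exact ⟨i, hlen, hall⟩
  · intro h
    exact pvWin_imp tn 0 fs h

-- if the tolerance is negative, A rejects any list with at least one step
theorem pvF_neg (t : Int) (f : Bool) (fs : List Bool) (ht : t < 0) :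
    pvF t (f :: fs) 0 = false := by
  simp only [pvF]
  split_ifs with h1 h2 <;> first | rfl | omega

-- B's inner all over range(i, i+w) equals the window-of-true-flags condition at i
theorem pvInner_eq (values : List Int) (tn : Nat) (i : Nat)
    (hiw : (i : Int) + ((tn : Int) + 1) ≤ (values.length : Int) - 1) :
    ((PySem.List.pyRange (i : Int) ((i : Int) + ((tn : Int) + 1)) 1).all
        (fun j => pvPairBad values j)) = true ↔
      (∀ k, k < tn + 1 → (pvFlags values).getD (i + k) false = true) := by
  rw [List.all_eq_true]
  constructor
  · intro h k hk
    have hmem : ((i + k : Nat) : Int) ∈ PySem.List.pyRange (i : Int) ((i : Int) + ((tn : Int) + 1)) 1 := by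
      rw [PySem.List.mem_pyRange_one]; push_cast; omega
    have := h _ hmem
    have hk1 : i + k + 1 < values.length := by omega
    rw [pvFlags_getD values (i + k) hk1]
    unfold pvPairBad at this
    have hg1 : PySem.List.pyGet? values ((i + k : Nat) : Int) = some (values[i+k]'(by omega)) :=
      PySem.List.pyGet?_ofNat values (i + k) (by omega)
    have hg2 : PySem.List.pyGet? values (((i + k : Nat) : Int) + 1) = some (values[i+k+1]'hk1) := by
      have hcast : ((i + k : Nat) : Int) + 1 = ((i + k + 1 : Nat) : Int) := by push_cast; omega
      rw [hcast]
      exact PySem.List.pyGet?_ofNat values (i + k + 1) hk1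
    rw [hg1, hg2] at this
    exact this
  · intro h j hj
    rw [PySem.List.mem_pyRange_one] at hj
    obtain ⟨k, rfl⟩ : ∃ k : Nat, j = ((i + k : Nat) : Int) := by
      refine ⟨(j - i).toNat, by omega⟩
    have hk : k < tn + 1 := by omega
    have hk1 : i + k + 1 < values.length := by omega
    have := h k hk
    rw [pvFlags_getD values (i + k) hk1] at this
    unfold pvPairBad
    have hg1 : PySem.List.pyGet? values ((i + k : Nat) : Int) = some (values[i+k]'(by omega)) :=
      PySem.List.pyGet?_ofNat values (i + k) (by omega)
    have hg2 : PySem.List.pyGet? values (((i + k : Nat) : Int) + 1) = some (values[i+k+1]'hk1) := by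
      have hcast : ((i + k : Nat) : Int) + 1 = ((i + k + 1 : Nat) : Int) := by push_cast; omega
      rw [hcast]
      exact PySem.List.pyGet?_ofNat values (i + k + 1) hk1
    rw [hg1, hg2]
    exact this

-- the short-circuiting loop equals List.any over the materialized range
theorem pvAnyWin_eq (values : List Int) (w : Int) (stop : Int) : ∀ i : Int,
    pvAnyWin values w i stop
      = (PySem.List.pyRange i stop 1).any (fun i' =>
          (PySem.List.pyRange i' (i' + w) 1).all (fun j => pvPairBad values j)) := by
  intro i
  by_cases h : i < stop
  · rw [PySem.List.pyRange_one_cons h, List.any_cons]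
    rw [pvAnyWin]
    simp only [dif_pos h]
    rw [pvAnyWin_eq values w stop (i + 1)]
    cases hinner : (PySem.List.pyRange i (i + w) 1).all (fun j => pvPairBad values j) <;> simp
  · rw [PySem.List.pyRange_one_eq_nil (by omega)]
    rw [pvAnyWin]
    simp [dif_neg h]
termination_by i => (stop - i).toNat
decreasing_by omega

-- B's outer any equals window existence over the flags
theorem pvOuter_eq (values : List Int) (tn : Nat) :
    ((PySem.List.pyRange 0 ((values.length : Int) - ((tn : Int) + 1)) 1).any (fun i =>
        (PySem.List.pyRange i (i + ((tn : Int) + 1)) 1).all (fun j => pvPairBad values j))) = true ↔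
      pvWin (tn + 1) (pvFlags values) := by
  rw [List.any_eq_true]
  constructor
  · rintro ⟨i, hmem, hall⟩
    rw [PySem.List.mem_pyRange_one] at hmem
    obtain ⟨inat, rfl⟩ : ∃ inat : Nat, i = (inat : Int) := ⟨i.toNat, by omega⟩
    have hiw : (inat : Int) + ((tn : Int) + 1) ≤ (values.length : Int) - 1 := by omega
    refine ⟨inat, by rw [pvFlags_length]; omega, ?_⟩
    exact (pvInner_eq values tn inat hiw).1 hall
  · rintro ⟨i, hlen, hall⟩
    rw [pvFlags_length] at hlen
    have hn : 2 ≤ values.length := by omega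
    have hiw : (i : Int) + ((tn : Int) + 1) ≤ (values.length : Int) - 1 := by omega
    refine ⟨(i : Int), ?_, (pvInner_eq values tn i hiw).2 hall⟩
    rw [PySem.List.mem_pyRange_one]
    omega

-- ===== VERDICT (by name: the statement is the Claim_ definition above) =====
theorem is_continuously_increasing_spec : Claim_equal_is_continuously_increasing := by
  intro values tolerance _
  unfold Spec_is_continuously_increasing is_continuously_increasing is_continuously_increasing_alt
  have hA := pvALoop_eq_pvF values tolerance 1 0 (le_refl 1)
  simp only [Nat.cast_one] at hA
  rw [hA]
  simp only [Nat.sub_self, List.drop_zero]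
  by_cases hlen : (values.length : Int) < 2
  · rw [if_pos hlen, pvFlags_short values (by omega)]
    rfl
  · rw [if_neg hlen]
    rw [pvAnyWin_eq values (tolerance + 1) ((values.length : Int) - (tolerance + 1)) 0]
    by_cases ht : 0 ≤ tolerance
    · obtain ⟨tn, rfl⟩ : ∃ tn : Nat, tolerance = (tn : Int) := ⟨tolerance.toNat, by omega⟩
      rcases Bool.eq_false_or_eq_true (pvF (tn : Int) (pvFlags values) 0) with hF | hF
      · rw [hF]
        have hnw : ¬ pvWin (tn + 1) (pvFlags values) := by
          intro h
          rw [(pvF_zero_false_iff tn (pvFlags values)).2 h] at hF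
          simp at hF
        rcases Bool.eq_false_or_eq_true ((PySem.List.pyRange 0 ((values.length : Int) - ((tn : Int) + 1)) 1).any (fun i =>
            (PySem.List.pyRange i (i + ((tn : Int) + 1)) 1).all (fun j => pvPairBad values j))) with hany | hany
        · exact absurd ((pvOuter_eq values tn).1 hany) hnw
        · rw [hany]; rfl
      · rw [hF]
        have := (pvF_zero_false_iff tn (pvFlags values)).1 hF
        rw [((pvOuter_eq values tn).2 this : _ = true)]
        rfl
    · -- tolerance < 0: both sides are false
      obtain ⟨a, b, l, rfl⟩ : ∃ a b l, values = a :: b :: l := by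
        match values with
        | [] => simp at hlen
        | [a] => simp at hlen
        | a :: b :: l => exact ⟨a, b, l, rfl⟩
      rw [pvFlags_cons_cons, pvF_neg tolerance _ _ (by omega)]
      have hz : ((0 : Int)) ∈ PySem.List.pyRange 0 (((a :: b :: l).length : Int) - (tolerance + 1)) 1 := by
        rw [PySem.List.mem_pyRange_one]
        simp
        omega
      have hinner : (PySem.List.pyRange (0 : Int) (0 + (tolerance + 1)) 1).all (fun j => pvPairBad (a :: b :: l) j) = true := by
        rw [PySem.List.pyRange_one_eq_nil (by omega)]
        rfl
      have hany : ((PySem.List.pyRange 0 (((a :: b :: l).length : Int) - (tolerance + 1)) 1).any (fun i =>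
          (PySem.List.pyRange i (i + (tolerance + 1)) 1).all (fun j => pvPairBad (a :: b :: l) j))) = true := by
        rw [List.any_eq_true]
        exact ⟨0, hz, hinner⟩
      rw [hany]
      rfl
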